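-- pv_equiv track=rewrite | github.com/nhungla/Data-Structures-and-Algorithms | Orange/Dynamic Programming/Bitmask/Pick The Sticks - UVA.py | solve
-- ===== SOURCE A (Python) =====
-- def solve(golds, l, n):
--     dp = [[[0] * 3 for _ in range(2 * l + 1)] for _ in range(n + 1)]
--     for i, (a, v) in enumerate(golds[1:], 1):
--         for j in range(1, 2 * l + 1):
--             for k in range(3):
--                 dp[i][j][k] = dp[i - 1][j][k]
--                 if j >= 2 * a:
--                     dp[i][j][k] = max(dp[i][j][k], dp[i - 1][j - 2 * a][k] + v)
--                 if j >= a and k: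
--                     dp[i][j][k] = max(dp[i][j][k], dp[i - 1][j - a][k - 1] + v)
--     return dp
-- ===== SOURCE B (Python) =====
-- def solve(golds, l, n):
--     # Top-down memoized recursion of the same recurrence; builds the same table.
--     t = len(golds) - 1
--     memo = {}
--     def rec(i, j, k):
--         if i == 0 or j == 0:
--             return 0
--         key = (i, j, k)
--         if key not in memo:
--             a, v = golds[i]
--             best = rec(i - 1, j, k)
--             if j >= 2 * a:
--                 best = max(best, rec(i - 1, j - 2 * a, k) + v)
--             if k and j >= a:
--                 best = max(best, rec(i - 1, j - a, k - 1) + v)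
--             memo[key] = best
--         return memo[key]
--     return [[[rec(i, j, k) if i <= t else 0 for k in range(3)]
--              for j in range(2 * l + 1)]
--             for i in range(n + 1)]
-- ===== Notes on version B (the rewrite author's own statement) =====
-- stated objective: alternative
-- what changed: Replaces the bottom-up triple loop that mutates a preallocated 3D table with a top-down memoized recursion rec(i,j,k) of the same recurrence; the returned table is built by a comprehension over all cells.
import Mathlib
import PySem

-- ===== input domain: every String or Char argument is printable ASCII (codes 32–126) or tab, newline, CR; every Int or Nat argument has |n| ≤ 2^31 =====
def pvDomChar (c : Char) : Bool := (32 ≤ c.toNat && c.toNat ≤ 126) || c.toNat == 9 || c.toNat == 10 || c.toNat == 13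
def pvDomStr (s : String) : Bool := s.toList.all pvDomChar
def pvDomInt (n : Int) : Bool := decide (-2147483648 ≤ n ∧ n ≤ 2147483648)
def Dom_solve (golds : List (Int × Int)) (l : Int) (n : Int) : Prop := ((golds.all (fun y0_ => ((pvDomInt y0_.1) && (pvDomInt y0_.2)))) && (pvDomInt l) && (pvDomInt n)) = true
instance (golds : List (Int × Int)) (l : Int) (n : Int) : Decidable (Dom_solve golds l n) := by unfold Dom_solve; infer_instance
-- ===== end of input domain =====

-- B replaces A's bottom-up triple loop over a mutated 3D table by a top-down memoized
-- recursion of the same recurrence (alternative decomposition, same asymptotic cost).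
-- A mutates no argument; equivalence is about the return value.

-- ===== PORT A =====
-- dp[i][j][k] read (0 default out of range; in-range on Pre_)
def pvGet3 (dp : List (List (List Int))) (i j k : Nat) : Int :=
  ((dp.getD i []).getD j []).getD k 0

-- dp[i][j][k] = x
def pvSet3 (dp : List (List (List Int))) (i j k : Nat) (x : Int) : List (List (List Int)) :=
  dp.modify i (fun row => row.modify j (fun cell => cell.set k x))

-- the three statements of A's innermost loop body for one (i, j, k)
def pvCell (g : Int × Int) (i j : Int) (k : Nat) (dp : List (List (List Int))) : List (List (List Int)) :=
  let a := g.1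
  let v := g.2
  let dp := pvSet3 dp i.toNat j.toNat k (pvGet3 dp (i - 1).toNat j.toNat k)
  let dp := if 2 * a ≤ j then
      pvSet3 dp i.toNat j.toNat k
        (max (pvGet3 dp i.toNat j.toNat k) (pvGet3 dp (i - 1).toNat (j - 2 * a).toNat k + v))
    else dp
  let dp := if a ≤ j ∧ k ≠ 0 then
      pvSet3 dp i.toNat j.toNat k
        (max (pvGet3 dp i.toNat j.toNat k) (pvGet3 dp (i - 1).toNat (j - a).toNat (k - 1) + v))
    else dp
  dp

def solve (golds : List (Int × Int)) (l : Int) (n : Int) : List (List (List Int)) :=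
  let dp0 := List.replicate (n + 1).toNat (List.replicate (2 * l + 1).toNat ([0, 0, 0] : List Int))
  (PySem.List.enumerate golds.tail 1).foldl (fun dp ig =>
    (PySem.List.pyRange 1 (2 * l + 1) 1).foldl (fun dp j =>
      (List.range 3).foldl (fun dp k => pvCell ig.2 ig.1 j k dp) dp) dp) dp0

-- ===== PORT B =====
-- rec(i, j, k) of Source B (the memo dict is a pure cache; values are identical)
def pvRec (golds : List (Int × Int)) (i : Nat) (j : Int) (k : Nat) : Int :=
  match i with
  | 0 => 0
  | i' + 1 =>
    if j = 0 then 0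
    else
      let a := (golds.getD (i' + 1) (0, 0)).1
      let v := (golds.getD (i' + 1) (0, 0)).2
      let best := pvRec golds i' j k
      let best := if 2 * a ≤ j then max best (pvRec golds i' (j - 2 * a) k + v) else best
      let best := if k ≠ 0 ∧ a ≤ j then max best (pvRec golds i' (j - a) (k - 1) + v) else best
      best

def solve_alt (golds : List (Int × Int)) (l : Int) (n : Int) : List (List (List Int)) :=
  let t : Int := (golds.length : Int) - 1
  (PySem.List.pyRange 0 (n + 1) 1).map (fun i =>
    (PySem.List.pyRange 0 (2 * l + 1) 1).map (fun j =>
      (List.range 3).map (fun k => if i ≤ t then pvRec golds i.toNat j k else 0)))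

-- ===== PRECONDITION & SPEC =====
-- Pre_ excludes exactly the inputs where A raises IndexError: l > 0 with more than one
-- gold and either fewer than len(golds)-1 extra dp rows or a negative stick length.
def Pre_solve (golds : List (Int × Int)) (l : Int) (n : Int) : Prop :=
  l ≤ 0 ∨ golds.length ≤ 1 ∨ ((golds.length : Int) - 1 ≤ n ∧ ∀ p ∈ golds.tail, 0 ≤ p.1)
instance (golds : List (Int × Int)) (l : Int) (n : Int) : Decidable (Pre_solve golds l n) := by
  unfold Pre_solve; infer_instance

def pvWitness_solve : (List (Int × Int)) × Int × Int := ([(0, 0), (2, 3)], 2, 1)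

def Spec_solve (golds : List (Int × Int)) (l : Int) (n : Int) (out : List (List (List Int))) : Prop :=
  out = solve_alt golds l n
instance (golds : List (Int × Int)) (l : Int) (n : Int) (out : List (List (List Int))) : Decidable (Spec_solve golds l n out) := by
  unfold Spec_solve; infer_instance

-- ===== CLAIM (what is proved, stated in full; the proofs are below) =====
def Claim_equal_solve : Prop := ∀ (golds : List (Int × Int)) (l : Int) (n : Int), Dom_solve golds l n → Pre_solve golds l n → Spec_solve golds l n (solve golds l n)


-- ===== LEMMAS AND PROOFS =====

-- shape of the dp table: every row has C cells of length 3
def pvShaped (C : Nat) (dp : List (List (List Int))) : Prop :=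
  ∀ i, i < dp.length → (dp.getD i []).length = C ∧ ∀ j, j < C → ((dp.getD i []).getD j []).length = 3

-- dp agrees with the abstract table H on every in-range cell
def pvAgree (C : Nat) (H : Nat → Nat → Nat → Int) (dp : List (List (List Int))) : Prop :=
  pvShaped C dp ∧ ∀ i, i < dp.length → ∀ j, j < C → ∀ k, k < 3 → pvGet3 dp i j k = H i j k

-- the table A's rows hold after the first m sticks have been processed
def pvTabF (golds : List (Int × Int)) (m : Nat) (i j k : Nat) : Int :=
  if i ≤ m then pvRec golds i (j : Int) k else 0

lemma pvRec_zero_col (golds : List (Int × Int)) (i k : Nat) : pvRec golds i 0 k = 0 := by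
  cases i <;> simp [pvRec]

lemma length_pvSet3 (dp : List (List (List Int))) (i j k : Nat) (x : Int) :
    (pvSet3 dp i j k x).length = dp.length := by
  simp [pvSet3]

lemma pvAgree_ext (C : Nat) (H H' : Nat → Nat → Nat → Int) (dp : List (List (List Int)))
    (hA : pvAgree C H dp)
    (hHH : ∀ i, i < dp.length → ∀ j, j < C → ∀ k, k < 3 → H i j k = H' i j k) :
    pvAgree C H' dp := by
  refine ⟨hA.1, fun i hi j hj k hk => ?_⟩
  rw [hA.2 i hi j hj k hk, hHH i hi j hj k hk]

lemma pvGetD_modify_self {α : Type} (l : List α) (i : Nat) (f : α → α) (d : α) (h : i < l.length) :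
    (l.modify i f).getD i d = f (l.getD i d) := by
  rw [List.getD_eq_getElem?_getD, List.getElem?_modify, List.getElem?_eq_getElem h,
    List.getD_eq_getElem l d h]
  simp

lemma pvGetD_modify_ne {α : Type} (l : List α) (i i' : Nat) (f : α → α) (d : α) (h : i ≠ i') :
    (l.modify i f).getD i' d = l.getD i' d := by
  rw [List.getD_eq_getElem?_getD, List.getElem?_modify, List.getD_eq_getElem?_getD]
  cases l[i']? <;> simp [h]

lemma pvGetD_set_self {α : Type} (l : List α) (i : Nat) (a d : α) (h : i < l.length) :
    (l.set i a).getD i d = a := by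
  rw [List.getD_eq_getElem?_getD, List.getElem?_set]
  simp [h]

lemma pvGetD_set_ne {α : Type} (l : List α) (i i' : Nat) (a d : α) (h : i ≠ i') :
    (l.set i a).getD i' d = l.getD i' d := by
  rw [List.getD_eq_getElem?_getD, List.getElem?_set, List.getD_eq_getElem?_getD]
  simp [h]

lemma pvShaped_pvSet3 (C : Nat) (dp : List (List (List Int))) (i j k : Nat) (x : Int)
    (hS : pvShaped C dp) : pvShaped C (pvSet3 dp i j k x) := by
  intro i2 h2
  simp only [pvSet3, List.length_modify] at h2
  obtain ⟨hr, hc⟩ := hS i2 h2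
  by_cases hii : i = i2
  · subst hii
    rw [pvSet3, pvGetD_modify_self _ _ _ _ h2]
    refine ⟨by rw [List.length_modify]; exact hr, fun j2 hj2 => ?_⟩
    by_cases hjj : j = j2
    · subst hjj
      rw [pvGetD_modify_self _ _ _ _ (by omega), List.length_set]
      exact hc j hj2
    · rw [pvGetD_modify_ne _ _ _ _ _ hjj]
      exact hc j2 hj2
  · rw [pvSet3, pvGetD_modify_ne _ _ _ _ _ hii]
    exact ⟨hr, hc⟩

lemma pvGet3_pvSet3 (C : Nat) (dp : List (List (List Int))) (i j k : Nat) (x : Int)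
    (hS : pvShaped C dp) (hi : i < dp.length) (hj : j < C) (hk : k < 3) (i' j' k' : Nat) :
    pvGet3 (pvSet3 dp i j k x) i' j' k' =
      if i' = i ∧ j' = j ∧ k' = k then x else pvGet3 dp i' j' k' := by
  obtain ⟨hr, hc⟩ := hS i hi
  by_cases hii : i' = i
  · subst hii
    rw [pvGet3, pvSet3, pvGetD_modify_self _ _ _ _ hi]
    by_cases hjj : j' = j
    · subst hjj
      rw [pvGetD_modify_self _ _ _ _ (by omega)]
      by_cases hkk : k' = k
      · subst hkk
        rw [pvGetD_set_self _ _ _ _ (by rw [hc j' hj]; omega)]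
        simp
      · rw [pvGetD_set_ne _ _ _ _ _ (by omega)]
        simp [pvGet3, hkk]
    · rw [pvGetD_modify_ne _ _ _ _ _ (by omega)]
      simp [pvGet3, hjj]
  · rw [pvGet3, pvSet3, pvGetD_modify_ne _ _ _ _ _ (by omega)]
    simp [pvGet3, hii]

lemma pvRec_succ (golds : List (Int × Int)) (i : Nat) (j : Int) (k : Nat)
    (hi : 1 ≤ i) (hj : j ≠ 0) :
    pvRec golds i j k =
      (if k ≠ 0 ∧ (golds.getD i (0, 0)).1 ≤ j then
        max (if 2 * (golds.getD i (0, 0)).1 ≤ j then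
              max (pvRec golds (i - 1) j k) (pvRec golds (i - 1) (j - 2 * (golds.getD i (0, 0)).1) k + (golds.getD i (0, 0)).2)
            else pvRec golds (i - 1) j k)
            (pvRec golds (i - 1) (j - (golds.getD i (0, 0)).1) (k - 1) + (golds.getD i (0, 0)).2)
      else
        (if 2 * (golds.getD i (0, 0)).1 ≤ j then
              max (pvRec golds (i - 1) j k) (pvRec golds (i - 1) (j - 2 * (golds.getD i (0, 0)).1) k + (golds.getD i (0, 0)).2)
            else pvRec golds (i - 1) j k)) := by
  obtain ⟨m, rfl⟩ : ∃ m, i = m + 1 := ⟨i - 1, by omega⟩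
  conv_lhs => rw [pvRec]
  rw [if_neg hj]
  simp only [Nat.add_sub_cancel]

lemma length_pvCell (g : Int × Int) (i j : Int) (k : Nat) (dp : List (List (List Int))) :
    (pvCell g i j k dp).length = dp.length := by
  simp only [pvCell]
  split_ifs <;> simp [length_pvSet3]

-- one cell: pvCell writes pvRec's value at (i, j, k) and changes nothing else
lemma pvStage3 (golds : List (Int × Int)) (C : Nat) (H : Nat → Nat → Nat → Int)
    (dp dpX : List (List (List Int))) (i j : Int) (k : Nat)
    (hget : ∀ i', i' < dp.length → ∀ j', j' < C → ∀ k', k' < 3 → pvGet3 dp i' j' k' = H i' j' k')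
    (hi1 : 1 ≤ i) (hiR : i.toNat < dp.length)
    (hj1 : 1 ≤ j) (hjC : j.toNat < C) (hk : k < 3)
    (ha : 0 ≤ (golds.getD i.toNat (0, 0)).1)
    (hprev : ∀ j' k', j' < C → k' < 3 → H (i.toNat - 1) j' k' = pvRec golds (i.toNat - 1) (j' : Int) k')
    (b1 b2 : Int)
    (hb2 : b2 = if k ≠ 0 ∧ (golds.getD i.toNat (0, 0)).1 ≤ j then
        max b1 (pvRec golds (i.toNat - 1) (j - (golds.getD i.toNat (0, 0)).1) (k - 1) + (golds.getD i.toNat (0, 0)).2)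
      else b1)
    (hrec : pvRec golds i.toNat j k = b2)
    (hSX : pvShaped C dpX) (hlenX : dpX.length = dp.length)
    (hgX : ∀ i' j' k', pvGet3 dpX i' j' k' =
      if i' = i.toNat ∧ j' = j.toNat ∧ k' = k then b1 else pvGet3 dp i' j' k') :
    pvAgree C
      (fun i' j' k' => if i' = i.toNat ∧ j' = j.toNat ∧ k' = k then pvRec golds i.toNat j k else H i' j' k')
      (if (golds.getD i.toNat (0, 0)).1 ≤ j ∧ k ≠ 0 then
        pvSet3 dpX i.toNat j.toNat k
          (max (pvGet3 dpX i.toNat j.toNat k)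
            (pvGet3 dpX (i - 1).toNat (j - (golds.getD i.toNat (0, 0)).1).toNat (k - 1) + (golds.getD i.toNat (0, 0)).2))
      else dpX) := by
  have hi1n : (i - 1).toNat = i.toNat - 1 := by omega
  have hine : i.toNat - 1 ≠ i.toNat := by omega
  set g := golds.getD i.toNat (0, 0) with hgdef
  by_cases h3 : g.1 ≤ j ∧ k ≠ 0
  · rw [if_pos h3]
    have hval : max (pvGet3 dpX i.toNat j.toNat k)
        (pvGet3 dpX (i - 1).toNat (j - g.1).toNat (k - 1) + g.2) = b2 := by
      rw [hgX, if_pos ⟨rfl, rfl, rfl⟩, hgX, if_neg (by simp [hi1n, hine]), hi1n,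
        hget _ (by omega) _ (by omega) _ (by omega), hprev _ _ (by omega) (by omega),
        Int.toNat_of_nonneg (by omega), hb2, if_pos ⟨h3.2, h3.1⟩]
    refine ⟨pvShaped_pvSet3 _ _ _ _ _ _ hSX, fun i' hi' j' hj' k' hk' => ?_⟩
    rw [length_pvSet3] at hi'
    beta_reduce
    rw [pvGet3_pvSet3 C dpX _ _ _ _ hSX (by omega) hjC hk, hval, hgX]
    by_cases hP : i' = i.toNat ∧ j' = j.toNat ∧ k' = k
    · rw [if_pos hP, if_pos hP, hrec]
    · rw [if_neg hP, if_neg hP, if_neg hP, hget _ (by omega) _ hj' _ hk']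
  · rw [if_neg h3]
    have hb2b1 : b2 = b1 := by
      rw [hb2, if_neg (fun hc => h3 ⟨hc.2, hc.1⟩)]
    refine ⟨hSX, fun i' hi' j' hj' k' hk' => ?_⟩
    beta_reduce
    rw [hgX]
    by_cases hP : i' = i.toNat ∧ j' = j.toNat ∧ k' = k
    · rw [if_pos hP, if_pos hP, hrec, hb2b1]
    · rw [if_neg hP, if_neg hP, hget _ (by omega) _ hj' _ hk']

lemma pvCell_agree (golds : List (Int × Int)) (C : Nat) (H : Nat → Nat → Nat → Int)
    (dp : List (List (List Int))) (i j : Int) (k : Nat)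
    (hA : pvAgree C H dp)
    (hi1 : 1 ≤ i) (hiR : i.toNat < dp.length)
    (hj1 : 1 ≤ j) (hjC : j.toNat < C) (hk : k < 3)
    (ha : 0 ≤ (golds.getD i.toNat (0, 0)).1)
    (hprev : ∀ j' k', j' < C → k' < 3 → H (i.toNat - 1) j' k' = pvRec golds (i.toNat - 1) (j' : Int) k') :
    pvAgree C
      (fun i' j' k' => if i' = i.toNat ∧ j' = j.toNat ∧ k' = k then pvRec golds i.toNat j k else H i' j' k')
      (pvCell (golds.getD i.toNat (0, 0)) i j k dp) := by
  obtain ⟨hS, hget⟩ := hA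
  have hi1n : (i - 1).toNat = i.toNat - 1 := by omega
  have hine : i.toNat - 1 ≠ i.toNat := by omega
  have hjcast : ((j.toNat : Int)) = j := by omega
  set g := golds.getD i.toNat (0, 0) with hgdef
  set b0 := pvRec golds (i.toNat - 1) j k with hb0
  set b1 := if 2 * g.1 ≤ j then max b0 (pvRec golds (i.toNat - 1) (j - 2 * g.1) k + g.2) else b0 with hb1
  set b2 := if k ≠ 0 ∧ g.1 ≤ j then max b1 (pvRec golds (i.toNat - 1) (j - g.1) (k - 1) + g.2) else b1 with hb2
  have hrec : pvRec golds i.toNat j k = b2 := by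
    rw [pvRec_succ golds i.toNat j k (by omega) (by omega), hb2, hb1, hb0, hgdef]
  have hv0 : pvGet3 dp (i - 1).toNat j.toNat k = b0 := by
    rw [hi1n, hget _ (by omega) _ hjC _ hk, hprev _ _ hjC hk, hjcast]
  simp only [pvCell]
  set dp1 := pvSet3 dp i.toNat j.toNat k (pvGet3 dp (i - 1).toNat j.toNat k) with hdp1
  have hS1 : pvShaped C dp1 := pvShaped_pvSet3 _ _ _ _ _ _ hS
  have hlen1 : dp1.length = dp.length := length_pvSet3 _ _ _ _ _
  have hg1 : ∀ i' j' k', pvGet3 dp1 i' j' k' =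
      if i' = i.toNat ∧ j' = j.toNat ∧ k' = k then b0 else pvGet3 dp i' j' k' := by
    intro i' j' k'
    rw [hdp1, pvGet3_pvSet3 C dp _ _ _ _ hS hiR hjC hk, hv0]
  by_cases h2 : 2 * g.1 ≤ j
  · rw [if_pos h2]
    set dp2 := pvSet3 dp1 i.toNat j.toNat k
        (max (pvGet3 dp1 i.toNat j.toNat k) (pvGet3 dp1 (i - 1).toNat (j - 2 * g.1).toNat k + g.2)) with hdp2
    have hval2 : max (pvGet3 dp1 i.toNat j.toNat k) (pvGet3 dp1 (i - 1).toNat (j - 2 * g.1).toNat k + g.2) = b1 := by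
      rw [hg1, if_pos ⟨rfl, rfl, rfl⟩, hg1, if_neg (by simp [hi1n, hine]), hi1n,
        hget _ (by omega) _ (by omega) _ hk, hprev _ _ (by omega) hk,
        Int.toNat_of_nonneg (by omega), hb1, if_pos h2]
    have hS2 : pvShaped C dp2 := pvShaped_pvSet3 _ _ _ _ _ _ hS1
    have hlen2 : dp2.length = dp.length := by rw [hdp2, length_pvSet3, hlen1]
    have hg2 : ∀ i' j' k', pvGet3 dp2 i' j' k' =
        if i' = i.toNat ∧ j' = j.toNat ∧ k' = k then b1 else pvGet3 dp i' j' k' := by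
      intro i' j' k'
      rw [hdp2, pvGet3_pvSet3 C dp1 _ _ _ _ hS1 (by omega) hjC hk, hval2, hg1]
      by_cases hP : i' = i.toNat ∧ j' = j.toNat ∧ k' = k
      · rw [if_pos hP, if_pos hP]
      · rw [if_neg hP, if_neg hP, if_neg hP]
    exact pvStage3 golds C H dp dp2 i j k hget hi1 hiR hj1 hjC hk ha hprev b1 b2 hb2 hrec hS2 hlen2 hg2
  · rw [if_neg h2]
    have hb1b0 : b1 = b0 := by rw [hb1, if_neg h2]
    have hg2 : ∀ i' j' k', pvGet3 dp1 i' j' k' =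
        if i' = i.toNat ∧ j' = j.toNat ∧ k' = k then b1 else pvGet3 dp i' j' k' := by
      intro i' j' k'; rw [hg1, hb1b0]
    exact pvStage3 golds C H dp dp1 i j k hget hi1 hiR hj1 hjC hk ha hprev b1 b2 hb2 hrec hS1 hlen1 hg2

lemma length_pvKFold (g : Int × Int) (i j : Int) (dp : List (List (List Int))) :
    ((List.range 3).foldl (fun dp k => pvCell g i j k dp) dp).length = dp.length := by
  have h3 : List.range 3 = [0, 1, 2] := rfl
  rw [h3]
  simp only [List.foldl_cons, List.foldl_nil, length_pvCell]

lemma length_pvJFold (g : Int × Int) (i : Int) (js : List Int) (dp : List (List (List Int))) :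
    ((js.foldl (fun dp j => (List.range 3).foldl (fun dp k => pvCell g i j k dp) dp) dp)).length = dp.length := by
  induction js generalizing dp with
  | nil => rfl
  | cons j0 js ih => rw [List.foldl_cons, ih, length_pvKFold]

-- the k-loop fills all three entries of cell (i, j)
lemma pvKFold_agree (golds : List (Int × Int)) (C : Nat) (H : Nat → Nat → Nat → Int)
    (dp : List (List (List Int))) (i j : Int)
    (hA : pvAgree C H dp)
    (hi1 : 1 ≤ i) (hiR : i.toNat < dp.length)
    (hj1 : 1 ≤ j) (hjC : j.toNat < C)
    (ha : 0 ≤ (golds.getD i.toNat (0, 0)).1)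
    (hprev : ∀ j' k', j' < C → k' < 3 → H (i.toNat - 1) j' k' = pvRec golds (i.toNat - 1) (j' : Int) k') :
    pvAgree C
      (fun i' j' k' => if i' = i.toNat ∧ j' = j.toNat then pvRec golds i.toNat j k' else H i' j' k')
      ((List.range 3).foldl (fun dp k => pvCell (golds.getD i.toNat (0, 0)) i j k dp) dp) := by
  have h3 : List.range 3 = [0, 1, 2] := rfl
  rw [h3]
  simp only [List.foldl_cons, List.foldl_nil]
  have hA0 := pvCell_agree golds C H dp i j 0 hA hi1 hiR hj1 hjC (by omega) ha hprev
  have hlen0 : (pvCell (golds.getD i.toNat (0, 0)) i j 0 dp).length = dp.length := length_pvCell _ _ _ _ _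
  have hprev0 : ∀ j' k', j' < C → k' < 3 →
      (fun i' j' k' => if i' = i.toNat ∧ j' = j.toNat ∧ k' = 0 then pvRec golds i.toNat j 0 else H i' j' k') (i.toNat - 1) j' k' = pvRec golds (i.toNat - 1) (j' : Int) k' := by
    intro j' k' h1' h2'
    beta_reduce
    rw [if_neg (fun hc => absurd hc.1 (by omega)), hprev _ _ h1' h2']
  have hA1 := pvCell_agree golds C _ _ i j 1 hA0 hi1 (by omega) hj1 hjC (by omega) ha hprev0
  have hlen1 : (pvCell (golds.getD i.toNat (0, 0)) i j 1 (pvCell (golds.getD i.toNat (0, 0)) i j 0 dp)).length = dp.length := by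
    rw [length_pvCell, hlen0]
  have hprev1 : ∀ j' k', j' < C → k' < 3 →
      (fun i' j' k' => if i' = i.toNat ∧ j' = j.toNat ∧ k' = 1 then pvRec golds i.toNat j 1 else
        if i' = i.toNat ∧ j' = j.toNat ∧ k' = 0 then pvRec golds i.toNat j 0 else H i' j' k') (i.toNat - 1) j' k' = pvRec golds (i.toNat - 1) (j' : Int) k' := by
    intro j' k' h1' h2'
    beta_reduce
    rw [if_neg (fun hc => absurd hc.1 (by omega)), if_neg (fun hc => absurd hc.1 (by omega)),
      hprev _ _ h1' h2']
  have hA2 := pvCell_agree golds C _ _ i j 2 hA1 hi1 (by omega) hj1 hjC (by omega) ha hprev1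
  refine pvAgree_ext C _ _ _ hA2 ?_
  intro i' hi' j' hj' k' hk'
  by_cases hij : i' = i.toNat ∧ j' = j.toNat
  · obtain ⟨h1', h2'⟩ := hij
    interval_cases k' <;> simp [h1', h2']
  · have hn : ∀ (c : Prop) (_ : i' = i.toNat ∧ j' = j.toNat ∧ c), False :=
      fun c hc => hij ⟨hc.1, hc.2.1⟩
    rw [if_neg (hn _), if_neg (hn _), if_neg (hn _), if_neg hij]

-- the j-loop fills row i at every column of js
lemma pvJFold_agree (golds : List (Int × Int)) (C : Nat) (l : Int) (hC : C = (2 * l + 1).toNat)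
    (H : Nat → Nat → Nat → Int) (dp : List (List (List Int))) (i : Int) (js : List Int)
    (hi1 : 1 ≤ i)
    (ha : 0 ≤ (golds.getD i.toNat (0, 0)).1)
    (hjs : ∀ j ∈ js, 1 ≤ j ∧ j < 2 * l + 1)
    (hA : pvAgree C H dp)
    (hiR : i.toNat < dp.length)
    (hprev : ∀ j' k', j' < C → k' < 3 → H (i.toNat - 1) j' k' = pvRec golds (i.toNat - 1) (j' : Int) k') :
    pvAgree C
      (fun i' j' k' => if i' = i.toNat ∧ (j' : Int) ∈ js then pvRec golds i.toNat (j' : Int) k' else H i' j' k')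
      (js.foldl (fun dp j => (List.range 3).foldl (fun dp k => pvCell (golds.getD i.toNat (0, 0)) i j k dp) dp) dp) := by
  induction js generalizing H dp with
  | nil =>
    simp only [List.foldl_nil]
    refine pvAgree_ext C H _ dp hA ?_
    intro i' hi' j' hj' k' hk'
    simp
  | cons j0 js ih =>
    simp only [List.foldl_cons]
    have hj0 := hjs j0 List.mem_cons_self
    have hA1 := pvKFold_agree golds C H dp i j0 hA hi1 hiR hj0.1 (by omega) ha hprev
    have hlen1 : ((List.range 3).foldl (fun dp k => pvCell (golds.getD i.toNat (0, 0)) i j0 k dp) dp).length = dp.length :=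
      length_pvKFold _ _ _ _
    have hprev1 : ∀ j' k', j' < C → k' < 3 →
        (fun i' j' k' => if i' = i.toNat ∧ j' = j0.toNat then pvRec golds i.toNat j0 k' else H i' j' k') (i.toNat - 1) j' k' = pvRec golds (i.toNat - 1) (j' : Int) k' := by
      intro j' k' h1' h2'
      beta_reduce
      rw [if_neg (fun hc => absurd hc.1 (by omega)), hprev _ _ h1' h2']
    have hmain := ih _ _ (fun j hj => hjs j (List.mem_cons_of_mem _ hj)) hA1 (by omega) hprev1
    refine pvAgree_ext C _ _ _ hmain ?_
    intro i' hi' j' hj' k' hk'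
    beta_reduce
    by_cases hii : i' = i.toNat
    · by_cases hmem : (j' : Int) ∈ js
      · rw [if_pos ⟨hii, hmem⟩, if_pos ⟨hii, List.mem_cons_of_mem _ hmem⟩]
      · by_cases hj0' : (j' : Int) = j0
        · rw [if_neg (fun hc => hmem hc.2), if_pos ⟨hii, by omega⟩,
            if_pos ⟨hii, by rw [hj0']; exact List.mem_cons_self⟩, hj0']
        · rw [if_neg (fun hc => hmem hc.2), if_neg (fun hc => hj0' (by omega)),
            if_neg (fun hc => by rcases List.mem_cons.mp hc.2 with h | h; exact hj0' h; exact hmem h)]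
    · have hn : ∀ (c : Prop) (_ : i' = i.toNat ∧ c), False := fun c hc => hii hc.1
      rw [if_neg (hn _), if_neg (hn _), if_neg (hn _)]

-- the outer loop: processing rows m+1 .. m+rest.length of the table
lemma pvOuter_agree (golds : List (Int × Int)) (C : Nat) (l n : Int) (hC : C = (2 * l + 1).toNat)
    (rest : List (Int × Int)) (m : Nat) (dp : List (List (List Int)))
    (hrest : ∀ idx, (h : idx < rest.length) → rest[idx] = golds.getD (m + 1 + idx) (0, 0))
    (hA : pvAgree C (pvTabF golds m) dp)
    (hlen : dp.length = (n + 1).toNat)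
    (hb : 1 < C → ∀ idx : Nat, idx < rest.length → (m : Int) + idx + 1 ≤ n)
    (ha : 1 < C → ∀ p ∈ rest, 0 ≤ p.1) :
    pvAgree C (pvTabF golds (m + rest.length))
      ((PySem.List.enumerate rest ((m : Int) + 1)).foldl (fun dp ig =>
        (PySem.List.pyRange 1 (2 * l + 1) 1).foldl (fun dp j =>
          (List.range 3).foldl (fun dp k => pvCell ig.2 ig.1 j k dp) dp) dp) dp) := by
  induction rest generalizing m dp with
  | nil =>
    simpa using hA
  | cons g rest ih =>
    rw [PySem.List.enumerate_cons, List.foldl_cons]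
    have hti : ((m : Int) + 1).toNat = m + 1 := by omega
    have hg : g = golds.getD (m + 1) (0, 0) := by
      have := hrest 0 (by simp)
      simpa using this
    by_cases hC1 : 1 < C
    · -- the j-range is nonempty; row m+1 is filled with the recurrence values
      have hb0 : (m : Int) + 1 ≤ n := by
        have := hb hC1 0 (by simp)
        omega
      have hiR : ((m : Int) + 1).toNat < dp.length := by omega
      have ha0 : 0 ≤ (golds.getD ((m : Int) + 1).toNat (0, 0)).1 := by
        rw [hti, ← hg]
        exact ha hC1 g List.mem_cons_self
      have hprev : ∀ j' k', j' < C → k' < 3 →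
          pvTabF golds m (((m : Int) + 1).toNat - 1) j' k' = pvRec golds (((m : Int) + 1).toNat - 1) (j' : Int) k' := by
        intro j' k' _ _
        rw [hti]
        simp [pvTabF]
      have hA2 := pvJFold_agree golds C l hC (pvTabF golds m) dp ((m : Int) + 1) (PySem.List.pyRange 1 (2 * l + 1) 1)
        (by omega) ha0 (fun j hj => PySem.List.mem_pyRange_one.mp hj) hA hiR hprev
      rw [hg, ← hti]
      have hA3 : pvAgree C (pvTabF golds (m + 1))
          ((PySem.List.pyRange 1 (2 * l + 1) 1).foldl (fun dp j =>
            (List.range 3).foldl (fun dp k => pvCell (golds.getD ((m : Int) + 1).toNat (0, 0)) ((m : Int) + 1) j k dp) dp) dp) := by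
        refine pvAgree_ext C _ _ _ hA2 ?_
        intro i' hi' j' hj' k' hk'
        beta_reduce
        rw [hti]
        by_cases hii : i' = m + 1
        · by_cases hj1 : 1 ≤ j'
          · rw [if_pos ⟨hii, PySem.List.mem_pyRange_one.mpr (by constructor <;> omega)⟩, hii]
            simp [pvTabF]
          · rw [if_neg (fun hc => by
                have := (PySem.List.mem_pyRange_one.mp hc.2).1
                omega)]
            have hj0 : j' = 0 := by omega
            subst hj0 hii
            simp [pvTabF, pvRec_zero_col]
        · rw [if_neg (fun hc => hii (by omega))]
          simp only [pvTabF]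
          split_ifs <;> first | rfl | omega
      have hrest' : ∀ idx, (h : idx < rest.length) → rest[idx] = golds.getD (m + 1 + 1 + idx) (0, 0) := by
        intro idx h
        have := hrest (idx + 1) (by simp; omega)
        rw [List.getElem_cons_succ] at this
        rw [this]
        congr 1
        omega
      have hlen2 : ((PySem.List.pyRange 1 (2 * l + 1) 1).foldl (fun dp j =>
            (List.range 3).foldl (fun dp k => pvCell (golds.getD ((m : Int) + 1).toNat (0, 0)) ((m : Int) + 1) j k dp) dp) dp).length = (n + 1).toNat := by
        rw [length_pvJFold, hlen]
      have hgoal := ih (m + 1) _ hrest' hA3 hlen2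
        (fun hc idx hidx => by
          have := hb hc (idx + 1) (by simp; omega)
          push_cast at this ⊢
          omega)
        (fun hc p hp => ha hc p (List.mem_cons_of_mem _ hp))
      have hcast : ((m : Int) + 1) + 1 = ((m + 1 : Nat) : Int) + 1 := by push_cast; ring
      rw [hcast]
      have harr : m + 1 + rest.length = m + (g :: rest).length := by simp; omega
      rwa [harr] at hgoal
    · -- no columns beyond j = 0: the row loop is empty and rows stay zero
      have hnil : PySem.List.pyRange 1 (2 * l + 1) 1 = [] := by
        apply PySem.List.pyRange_one_eq_nil
        omega
      rw [hnil]
      simp only [List.foldl_nil]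
      have hA3 : pvAgree C (pvTabF golds (m + 1)) dp := by
        refine pvAgree_ext C _ _ _ hA ?_
        intro i' hi' j' hj' k' hk'
        have hj0 : j' = 0 := by omega
        subst hj0
        simp only [pvTabF]
        split_ifs <;> simp [pvRec_zero_col]
      have hgoal := ih (m + 1) _ (fun idx h => by
          have := hrest (idx + 1) (by simp; omega)
          rw [List.getElem_cons_succ] at this
          rw [this]
          congr 1
          omega) hA3 hlen
        (fun hc idx hidx => by
          have := hb hc (idx + 1) (by simp; omega)
          push_cast at this ⊢
          omega)
        (fun hc p hp => ha hc p (List.mem_cons_of_mem _ hp))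
      have hcast : ((m : Int) + 1) + 1 = ((m + 1 : Nat) : Int) + 1 := by push_cast; ring
      rw [hcast]
      rw [hnil] at hgoal
      simp only [List.foldl_nil] at hgoal
      have harr : m + 1 + rest.length = m + (g :: rest).length := by simp; omega
      rwa [harr] at hgoal

lemma length_pvEFold (es : List (Int × (Int × Int))) (l : Int) (dp : List (List (List Int))) :
    ((es.foldl (fun dp ig =>
        (PySem.List.pyRange 1 (2 * l + 1) 1).foldl (fun dp j =>
          (List.range 3).foldl (fun dp k => pvCell ig.2 ig.1 j k dp) dp) dp) dp)).length = dp.length := by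
  induction es generalizing dp with
  | nil => rfl
  | cons e es ih => rw [List.foldl_cons, ih, length_pvJFold]

lemma solve_eq_of_agree (golds : List (Int × Int)) (l n : Int)
    (dp : List (List (List Int)))
    (hA : pvAgree (2 * l + 1).toNat (pvTabF golds golds.tail.length) dp)
    (hlen : dp.length = (n + 1).toNat) :
    dp = solve_alt golds l n := by
  obtain ⟨hS, hget⟩ := hA
  apply List.ext_getElem
  · rw [hlen]
    simp [solve_alt, PySem.List.length_pyRange_one]
  intro i hi hi2
  have hrowlen : (dp.getD i []).length = (2 * l + 1).toNat := (hS i hi).1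
  have hrow_eq : dp[i] = dp.getD i [] := (List.getD_eq_getElem dp [] hi).symm
  simp only [solve_alt, List.getElem_map, PySem.List.getElem_pyRange_one]
  apply List.ext_getElem
  · rw [hrow_eq, hrowlen]
    simp [PySem.List.length_pyRange_one]
  intro j hj hj2
  have hjC : j < (2 * l + 1).toNat := by rw [hrow_eq, hrowlen] at hj; exact hj
  have hcelllen : ((dp.getD i []).getD j []).length = 3 := (hS i hi).2 j hjC
  have hcell_eq : dp[i][j] = (dp.getD i []).getD j [] := by
    conv_rhs => rw [← hrow_eq]
    exact (List.getD_eq_getElem dp[i] [] (by rw [hrow_eq, hrowlen]; exact hjC)).symm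
  have hcelllen3 : dp[i][j].length = 3 := by rw [hcell_eq]; exact hcelllen
  simp only [List.getElem_map, PySem.List.getElem_pyRange_one]
  apply List.ext_getElem
  · rw [hcelllen3]
    simp
  intro k hk hk2
  have hk3 : k < 3 := by rw [hcelllen3] at hk; exact hk
  simp only [List.getElem_map, List.getElem_range]
  have hlhs : dp[i][j][k] = pvGet3 dp i j k := by
    rw [pvGet3, ← hcell_eq]
    exact (List.getD_eq_getElem dp[i][j] 0 (by omega)).symm
  rw [hlhs, hget i hi j hjC k hk3, pvTabF]
  have e1 : ((0 : Int) + (i : Int)).toNat = i := by omega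
  have e2 : ((0 : Int) + (j : Int)) = (j : Int) := by omega
  rw [e2]
  have htl : golds.tail.length = golds.length - 1 := List.length_tail
  by_cases hit : i ≤ golds.tail.length
  · rw [if_pos hit]
    rcases Nat.eq_zero_or_pos golds.length with hg0 | hg1
    · have hi0 : i = 0 := by omega
      subst hi0
      rw [if_neg (by omega)]
      simp [pvRec]
    · rw [if_pos (by omega), e1]
  · rw [if_neg hit, if_neg (by omega)]

-- ===== VERDICT (by name: the statement is the Claim_ definition above) =====
theorem solve_spec : Claim_equal_solve := by
  intro golds l n _ hpre
  unfold Spec_solve solve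
  have hrest : ∀ idx, (h : idx < golds.tail.length) →
      golds.tail[idx] = golds.getD (0 + 1 + idx) (0, 0) := by
    intro idx h
    cases golds with
    | nil => simp at h
    | cons g0 t =>
      simp only [List.tail_cons] at h ⊢
      rw [show 0 + 1 + idx = idx + 1 from by omega, List.getD_cons_succ]
      exact (List.getD_eq_getElem t (0, 0) h).symm
  have h0 : pvAgree (2 * l + 1).toNat (pvTabF golds 0)
      (List.replicate (n + 1).toNat (List.replicate (2 * l + 1).toNat ([0, 0, 0] : List Int))) := by
    constructor
    · intro i hi
      rw [List.length_replicate] at hi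
      rw [List.getD_eq_getElem _ _ (by simpa using hi), List.getElem_replicate]
      refine ⟨by simp, fun j hj => ?_⟩
      rw [List.getD_eq_getElem _ _ (by simpa using hj), List.getElem_replicate]
      rfl
    · intro i hi j hj k hk
      rw [List.length_replicate] at hi
      rw [pvGet3, List.getD_eq_getElem _ _ (show i < (List.replicate (n + 1).toNat (List.replicate (2 * l + 1).toNat ([0, 0, 0] : List Int))).length by simpa using hi), List.getElem_replicate,
        List.getD_eq_getElem _ _ (show j < (List.replicate (2 * l + 1).toNat ([0, 0, 0] : List Int)).length by simpa using hj), List.getElem_replicate]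
      have hcell : ([0, 0, 0] : List Int).getD k 0 = 0 := by
        interval_cases k <;> rfl
      rw [hcell, pvTabF]
      split_ifs with h
      · have : i = 0 := by omega
        subst this
        simp [pvRec]
      · rfl
  have hb : 1 < (2 * l + 1).toNat → ∀ idx : Nat, idx < golds.tail.length →
      ((0 : Nat) : Int) + idx + 1 ≤ n := by
    intro hC1 idx hidx
    have htl : golds.tail.length = golds.length - 1 := List.length_tail
    rcases hpre with h | h | ⟨h1, h2⟩
    · omega
    · omega
    · push_cast
      omega
  have ha : 1 < (2 * l + 1).toNat → ∀ p ∈ golds.tail, 0 ≤ p.1 := by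
    intro hC1 p hp
    have htl : golds.tail.length = golds.length - 1 := List.length_tail
    rcases hpre with h | h | ⟨h1, h2⟩
    · omega
    · exfalso
      have hnil : golds.tail = [] := by
        have : golds.tail.length = 0 := by omega
        exact List.eq_nil_of_length_eq_zero this
      rw [hnil] at hp
      simp at hp
    · exact h2 p hp
  have hmain := pvOuter_agree golds (2 * l + 1).toNat l n rfl golds.tail 0
    (List.replicate (n + 1).toNat (List.replicate (2 * l + 1).toNat ([0, 0, 0] : List Int)))
    hrest h0 (by simp) hb ha
  simp only [Nat.cast_zero, zero_add] at hmain
  exact solve_eq_of_agree golds l n _ hmain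
    (by rw [length_pvEFold, List.length_replicate])
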